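-- pv_equiv track=rewrite | github.com/emx/sage | integrations/levelup/results/20260301_193831_sqli_1.5/challenges/sage_run_41/app.py | waf_filter
-- ===== SOURCE A (Python) =====
-- def waf_filter(s):
--     if not s:
--         return False
--     # Block common SQLi patterns and spaces
--     blacklist = ['union', ' ', '--', '/*', 'where', 'join', 'sleep', 'benchmark', 'group', 'having']
--     s_lower = s.lower()
--     for item in blacklist:
--         if item in s_lower:
--             return True
--     return False
-- ===== SOURCE B (Python) =====
-- def _insert(node, w):
--     if not w:
--         node[None] = True
--     else:
--         child = node.setdefault(w[0], {})
--         _insert(child, w[1:])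
--
--
-- def _match(node, t, j):
--     # does some word stored in the trie start at position j of t?
--     if None in node:
--         return True
--     if j < len(t) and t[j] in node:
--         return _match(node[t[j]], t, j + 1)
--     return False
--
--
-- def waf_filter(s):
--     if not s:
--         return False
--     blacklist = ['union', ' ', '--', '/*', 'where', 'join', 'sleep', 'benchmark', 'group', 'having']
--     root = {}
--     for w in blacklist:
--         _insert(root, w)
--     t = s.lower()
--     return any(_match(root, t, i) for i in range(len(t)))
-- ===== Notes on version B (the rewrite author's own statement) =====
-- stated objective: alternative
-- what changed: B builds a trie (prefix tree) of the blacklist once and walks it from each position of the lowercased string, so shared pattern prefixes are checked together in one pass, instead of A's ten independent full substring scans.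
import Mathlib
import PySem

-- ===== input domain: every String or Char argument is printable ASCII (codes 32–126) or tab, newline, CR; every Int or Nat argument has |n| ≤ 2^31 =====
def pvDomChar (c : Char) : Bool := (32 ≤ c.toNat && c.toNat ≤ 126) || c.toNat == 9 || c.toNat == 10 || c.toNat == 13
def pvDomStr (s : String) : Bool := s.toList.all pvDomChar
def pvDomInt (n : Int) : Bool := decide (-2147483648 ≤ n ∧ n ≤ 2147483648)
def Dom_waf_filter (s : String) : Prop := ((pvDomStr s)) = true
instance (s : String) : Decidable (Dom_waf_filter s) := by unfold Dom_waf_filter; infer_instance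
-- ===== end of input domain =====

-- B replaces A's ten independent substring scans by a trie (prefix tree) of the blacklist,
-- walked once from each position of the lowercased string (alternative data structure, same cost).


-- ===== PORT A =====
-- the blacklist literal, as a list of char lists
def pvBlacklist : List (List Char) :=
  ["union".toList, " ".toList, "--".toList, "/*".toList, "where".toList,
   "join".toList, "sleep".toList, "benchmark".toList, "group".toList, "having".toList]

-- 'for item in blacklist: if item in s_lower: return True' is the any-fold over the list
def waf_filter (s : String) : Bool :=
  if s = "" then false
  else
    let s_lower := PySem.Chars.lower s.toList
    pvBlacklist.any (fun item => PySem.Chars.isIn item s_lower)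

-- ===== PORT B =====
-- Python's trie node is a dict {char: child, None: True-marker}; ported as an end-marker flag
-- ('nd b cs') over an association list of children ('nilC' / 'consC c child rest'); one flat
-- inductive (a nested 'List' inside the constructor is not allowed here).
inductive PT : Type
  | nilC : PT
  | consC : Char → PT → PT → PT
  | nd : Bool → PT → PT
deriving DecidableEq, Repr

-- 'None in node' and the children dict of a node (non-node shapes never arise; read as empty)
def pvFlag : PT → Bool | .nd b _ => b | _ => false
def pvChil : PT → PT | .nd _ cs => cs | _ => .nilC

-- 'w[0] in node' / 'node[w[0]]': first-match lookup in the children list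
def pvFindC : PT → Char → Option PT
  | .consC c' t rest, c => if c' = c then some t else pvFindC rest c
  | _, _ => none

-- storing the updated child back (the in-place dict write of Python, done functionally)
def pvSetC : PT → Char → PT → PT
  | .consC c' t rest, c, u => if c' = c then .consC c' u rest else .consC c' t (pvSetC rest c u)
  | _, c, u => .consC c u .nilC

-- '_insert(node, w)' ('setdefault(w[0], {})' = look up the child, empty node if absent)
def pvInsertT : PT → List Char → PT
  | t, [] => .nd true (pvChil t)
  | t, c :: w =>
      .nd (pvFlag t)
        (pvSetC (pvChil t) c (pvInsertT ((pvFindC (pvChil t) c).getD (.nd false .nilC)) w))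

-- '_match(node, t, j)': walking j along t is consuming the suffix t[j:], so the port
-- recurses on the remaining list of characters
def pvMatchT : PT → List Char → Bool
  | t, [] => pvFlag t
  | t, c :: l =>
      pvFlag t || (match pvFindC (pvChil t) c with
                   | none => false
                   | some t' => pvMatchT t' l)

def waf_filter_alt (s : String) : Bool :=
  if s = "" then false
  else
    let root := pvBlacklist.foldl pvInsertT (.nd false .nilC)
    let t := PySem.Chars.lower s.toList
    (List.range t.length).any (fun i => pvMatchT root (t.drop i))

-- ===== PRECONDITION & SPEC =====
def Spec_waf_filter (s : String) (out : Bool) : Prop := out = waf_filter_alt s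
instance (s : String) (out : Bool) : Decidable (Spec_waf_filter s out) := by unfold Spec_waf_filter; infer_instance

-- ===== CLAIM (what is proved, stated in full; the proofs are below) =====
def Claim_equal_waf_filter : Prop := ∀ (s : String), Dom_waf_filter s → Spec_waf_filter s (waf_filter s)

-- ===== LEMMAS AND PROOFS =====

-- membership of a word in the trie (specification device for the proofs)
def pvMemT : PT → List Char → Bool
  | t, [] => pvFlag t
  | t, c :: l =>
      match pvFindC (pvChil t) c with
      | none => false
      | some t' => pvMemT t' l

lemma pvMemT_empty (l : List Char) : pvMemT (.nd false .nilC) l = false := by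
  cases l <;> simp [pvMemT, pvFindC, pvFlag, pvChil]

lemma pvChil_nd (b : Bool) (cs : PT) : pvChil (.nd b cs) = cs := rfl
lemma pvFlag_nd (b : Bool) (cs : PT) : pvFlag (.nd b cs) = b := rfl

lemma pvFindC_set (cs : PT) (c : Char) (u : PT) (d : Char) :
    pvFindC (pvSetC cs c u) d = if d = c then some u else pvFindC cs d := by
  induction cs with
  | nilC =>
      by_cases h : d = c
      · subst h; simp [pvSetC, pvFindC]
      · simp [pvSetC, pvFindC, h, Ne.symm h]
  | nd b cs ih =>
      by_cases h : d = c
      · subst h; simp [pvSetC, pvFindC]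
      · simp [pvSetC, pvFindC, h, Ne.symm h]
  | consC c' tc rest ih1 ih2 =>
      simp only [pvSetC]
      by_cases h1 : c' = c
      · subst h1
        by_cases h2 : d = c'
        · subst h2; simp [pvFindC]
        · simp [pvFindC, h2, Ne.symm h2]
      · by_cases h2 : c' = d
        · subst h2
          simp [pvFindC, h1]
        · simp [pvFindC, h1, h2, ih2]

lemma pvMemT_insert (w : List Char) : ∀ (t : PT) (v : List Char),
    pvMemT (pvInsertT t w) v = (decide (v = w) || pvMemT t v) := by
  induction w with
  | nil =>
      intro t v
      cases v with
      | nil => simp [pvInsertT, pvMemT, pvFlag_nd]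
      | cons d l => simp [pvInsertT, pvMemT, pvChil_nd]
  | cons c w' ih =>
      intro t v
      cases v with
      | nil => simp [pvInsertT, pvMemT, pvFlag_nd]
      | cons d l =>
          simp only [pvInsertT, pvMemT, pvChil_nd, pvFindC_set]
          by_cases h : d = c
          · subst h
            cases hf : pvFindC (pvChil t) d with
            | none => simp [ih, pvMemT_empty]
            | some t' => simp [ih]
          · cases hf : pvFindC (pvChil t) d <;> simp [h]

lemma pvMemT_foldl (ws : List (List Char)) : ∀ (t : PT) (v : List Char),
    pvMemT (ws.foldl pvInsertT t) v = (ws.any (fun w => decide (v = w)) || pvMemT t v) := by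
  induction ws with
  | nil => simp
  | cons w ws ih =>
      intro t v
      simp only [List.foldl_cons, ih, pvMemT_insert, List.any_cons]
      cases decide (v = w) <;> simp

lemma pvMatchT_iff (l : List Char) : ∀ (t : PT),
    pvMatchT t l = true ↔ ∃ w, pvMemT t w = true ∧ w <+: l := by
  induction l with
  | nil =>
      intro t
      constructor
      · intro h; exact ⟨[], h, List.prefix_refl _⟩
      · rintro ⟨w, hm, hp⟩
        rw [List.prefix_nil] at hp; subst hp; exact hm
  | cons c l' ih =>
      intro t
      simp only [pvMatchT, Bool.or_eq_true]
      constructor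
      · rintro (hb | hrec)
        · exact ⟨[], hb, List.nil_prefix⟩
        · cases hf : pvFindC (pvChil t) c with
          | none => rw [hf] at hrec; simp at hrec
          | some t' =>
              rw [hf] at hrec
              obtain ⟨w, hm, hp⟩ := (ih t').mp hrec
              refine ⟨c :: w, ?_, by simpa using hp⟩
              simp only [pvMemT, hf]
              exact hm
      · rintro ⟨w, hm, hp⟩
        cases w with
        | nil => exact Or.inl hm
        | cons d w' =>
            obtain ⟨hd, hp'⟩ : d = c ∧ w' <+: l' := by
              obtain ⟨u, hu⟩ := hp
              cases hu; exact ⟨rfl, ⟨u, rfl⟩⟩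
            subst hd
            simp only [pvMemT] at hm
            cases hf : pvFindC (pvChil t) d with
            | none => rw [hf] at hm; simp at hm
            | some t' =>
                rw [hf] at hm
                exact Or.inr ((ih t').mpr ⟨w', hm, hp'⟩)

lemma pvBlacklist_ne_nil : ∀ p ∈ pvBlacklist, p ≠ [] := by decide

lemma pvRoot_mem (v : List Char) :
    pvMemT (pvBlacklist.foldl pvInsertT (.nd false .nilC)) v = true ↔ v ∈ pvBlacklist := by
  rw [pvMemT_foldl]
  simp only [pvMemT_empty, Bool.or_false, List.any_eq_true, decide_eq_true_eq]
  constructor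
  · rintro ⟨w, hw, rfl⟩; exact hw
  · intro hv; exact ⟨v, hv, rfl⟩

lemma pv_main (t : List Char) :
    ((List.range t.length).any (fun i =>
        pvMatchT (pvBlacklist.foldl pvInsertT (.nd false .nilC)) (t.drop i)))
      = pvBlacklist.any (fun item => PySem.Chars.isIn item t) := by
  apply Bool.eq_iff_iff.mpr
  simp only [List.any_eq_true, List.mem_range, PySem.Chars.isIn_iff_infix]
  constructor
  · rintro ⟨i, _, hm⟩
    obtain ⟨w, hw, hp⟩ := (pvMatchT_iff _ _).mp hm
    exact ⟨w, (pvRoot_mem w).mp hw, hp.isInfix.trans (List.drop_suffix i t).isInfix⟩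
  · rintro ⟨p, hp, hinf⟩
    obtain ⟨u, v, huv⟩ := hinf
    refine ⟨u.length, ?_, (pvMatchT_iff _ _).mpr ⟨p, (pvRoot_mem p).mpr hp, ⟨v, ?_⟩⟩⟩
    · have h1 : t.length = u.length + p.length + v.length := by
        rw [← huv]; simp [List.length_append]; omega
      have h2 : 0 < p.length := List.length_pos_iff.mpr (pvBlacklist_ne_nil p hp)
      omega
    · rw [← huv]; simp

-- ===== VERDICT (by name: the statement is the Claim_ definition above) =====
theorem waf_filter_spec : Claim_equal_waf_filter := by
  intro s _
  unfold Spec_waf_filter waf_filter waf_filter_alt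
  by_cases hs : s = ""
  · rw [if_pos hs, if_pos hs]
  · rw [if_neg hs, if_neg hs]
    exact (pv_main (PySem.Chars.lower s.toList)).symm
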